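/- GENERATED by farm/mkstatement.py from design/units.tsv (unit `imdct_step3_inner_r_loop.2`) and the assertions of Vorbis/Spec/Mdct.lean — do not edit.
   THE STATEMENT of the proof unit `imdct_step3_inner_r_loop.2`: segment 2 of `imdct_step3_inner_r_loop` (91 instructions; entries 0x10576f;
   exits 0x10592b; ranges 0x10576f-0x105928)
   takes each of its entry assertions to one of its exit assertions (`Vorbis.Spec.imdct_step3_inner_r_loop.Seg2`), given the contracts of its callees.
   What the names mean: Vorbis/Spec/Basic.lean (the shared hypotheses), Vorbis/Spec/Mdct.lean (the assertions). The theorem to prove: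
   `theorem imdct_step3_inner_r_loop_2_ok : Vorbis.Spec.imdct_step3_inner_r_loop_2.Statement`. -/
import Vorbis.Spec.Mdct
namespace Vorbis.Spec.imdct_step3_inner_r_loop_2
open X86 X86.User Asan

/-- The statement of unit `imdct_step3_inner_r_loop.2`. -/
def Statement : Prop :=
  ∀ (Lay : Layout) (_hLay : Lay.hi = 0x1000000) (μ : Microarch) (_hμ : UserX.MicroOK μ) (u₀ : State)
    (_hcode : HasCodeNat Lay u₀ Vorbis.L.imdct_step3_inner_r_loop.entry Vorbis.Code.code_imdct_step3_inner_r_loop.nat Vorbis.L.imdct_step3_inner_r_loop.size)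
    (_h_asan_load4_noabort : Asan.SmallCheck Lay μ Vorbis.WayInv (Vorbis.CodeOK u₀) [.rax, .rcx, .rdx] 4 Vorbis.L.__asan_load4_noabort.entry),
    Vorbis.Spec.imdct_step3_inner_r_loop.Seg2 Lay μ u₀

end Vorbis.Spec.imdct_step3_inner_r_loop_2
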